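-- pv_equiv track=rewrite | github.com/yofn/pyacm | codeforces/geometry计算几何/900/6A四数搭三角形.py | maket
-- ===== SOURCE A (Python) =====
-- def maket(l):
--     l.sort()
--     bad = 'IMPOSSIBLE'
--     for i in range(len(l)-2):   #not limit to 4 case
--         if l[i]+l[i+1]>l[i+2]:
--             return 'TRIANGLE'
--         if l[i]+l[i+1]==l[i+2]:
--             bad = 'SEGMENT'
--     return bad
-- ===== SOURCE B (Python) =====
-- def maket(l):
--     # Equivalence is about the return value; like A, this sorts l in place.
--     l.sort()
--     if any(l[i] + l[i+1] > l[i+2] for i in range(len(l) - 2)):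
--         return 'TRIANGLE'
--     if any(l[i] + l[i+1] == l[i+2] for i in range(len(l) - 2)):
--         return 'SEGMENT'
--     return 'IMPOSSIBLE'
-- ===== Notes on version B (the rewrite author's own statement) =====
-- stated objective: simpler
-- what changed: Replaces A's single stateful loop (early return plus a 'bad' flag carried across iterations) with two independent short-circuiting any() scans over consecutive triples, one per answer, with a plain default.
import Mathlib
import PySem

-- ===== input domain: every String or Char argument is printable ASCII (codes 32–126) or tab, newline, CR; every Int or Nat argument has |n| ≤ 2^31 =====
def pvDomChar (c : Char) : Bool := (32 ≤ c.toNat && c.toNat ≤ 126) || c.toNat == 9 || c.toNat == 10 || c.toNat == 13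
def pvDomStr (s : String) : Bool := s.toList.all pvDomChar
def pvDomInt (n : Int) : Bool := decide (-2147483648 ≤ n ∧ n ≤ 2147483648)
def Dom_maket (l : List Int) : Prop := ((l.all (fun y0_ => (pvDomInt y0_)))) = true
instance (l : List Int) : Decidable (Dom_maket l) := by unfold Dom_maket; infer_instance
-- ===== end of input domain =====

-- B replaces A's single stateful loop (early return + 'bad' flag) with two independent
-- short-circuiting scans; objective: simpler. Python A sorts l in place (B does too);
-- the equivalence proved here is about the return value.

-- ===== PORT A =====
-- the loop 'for i in range(len(l)-2)' with early return and the 'bad' accumulator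
def maketLoopA (s : List Int) : List Int → String → String
  | [], bad => bad
  | i :: rest, bad =>
    if PySem.List.pyGetD s i 0 + PySem.List.pyGetD s (i+1) 0 > PySem.List.pyGetD s (i+2) 0 then
      "TRIANGLE"
    else if PySem.List.pyGetD s i 0 + PySem.List.pyGetD s (i+1) 0 = PySem.List.pyGetD s (i+2) 0 then
      maketLoopA s rest "SEGMENT"
    else
      maketLoopA s rest bad

def maket (l : List Int) : String :=
  let s := PySem.List.sorted l (fun x => x) false
  maketLoopA s (PySem.List.pyRange 0 ((s.length : Int) - 2) 1) "IMPOSSIBLE"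

-- ===== PORT B =====
def maket_alt (l : List Int) : String :=
  let s := PySem.List.sorted l (fun x => x) false
  let idxs := PySem.List.pyRange 0 ((s.length : Int) - 2) 1
  if idxs.any (fun i => decide (PySem.List.pyGetD s i 0 + PySem.List.pyGetD s (i+1) 0 > PySem.List.pyGetD s (i+2) 0)) then
    "TRIANGLE"
  else if idxs.any (fun i => decide (PySem.List.pyGetD s i 0 + PySem.List.pyGetD s (i+1) 0 = PySem.List.pyGetD s (i+2) 0)) then
    "SEGMENT"
  else
    "IMPOSSIBLE"

-- ===== PRECONDITION & SPEC =====
def Spec_maket (l : List Int) (out : String) : Prop := out = maket_alt l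
instance (l : List Int) (out : String) : Decidable (Spec_maket l out) := by unfold Spec_maket; infer_instance

-- ===== CLAIM (what is proved, stated in full; the proofs are below) =====
def Claim_equal_maket : Prop := ∀ (l : List Int), Dom_maket l → Spec_maket l (maket l)

-- ===== LEMMAS AND PROOFS =====
theorem maketLoopA_eq (s : List Int) (idxs : List Int) (bad : String) :
    maketLoopA s idxs bad =
      if idxs.any (fun i => decide (PySem.List.pyGetD s i 0 + PySem.List.pyGetD s (i+1) 0 > PySem.List.pyGetD s (i+2) 0)) then
        "TRIANGLE"
      else if idxs.any (fun i => decide (PySem.List.pyGetD s i 0 + PySem.List.pyGetD s (i+1) 0 = PySem.List.pyGetD s (i+2) 0)) then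
        "SEGMENT"
      else bad := by
  induction idxs generalizing bad with
  | nil => simp [maketLoopA]
  | cons i rest ih =>
    simp only [maketLoopA, List.any_cons]
    by_cases h1 : PySem.List.pyGetD s i 0 + PySem.List.pyGetD s (i+1) 0 > PySem.List.pyGetD s (i+2) 0
    · simp [h1]
    · by_cases h2 : PySem.List.pyGetD s i 0 + PySem.List.pyGetD s (i+1) 0 = PySem.List.pyGetD s (i+2) 0
      · rw [ih]; simp [h2]
      · simp [h1, h2, ih]

-- ===== VERDICT (by name: the statement is the Claim_ definition above) =====
theorem maket_spec : Claim_equal_maket := by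
  intro l _
  unfold Spec_maket maket maket_alt
  exact maketLoopA_eq _ _ _
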